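-- pv_equiv track=rewrite | github.com/Tylerqche/Projects_Python | Cmsc132_HW1.py | joined_list
-- ===== SOURCE A (Python) =====
-- def joined_list(n):
--     """
--         >>> joined_list(5)
--         [1, 2, 3, 4, 5, 5, 4, 3, 2, 1]
--         >>> joined_list(-8)
--         [-8, -7, -6, -5, -4, -3, -2, -1, -1, -2, -3, -4, -5, -6, -7, -8]
--     """
--     #- YOUR CODE STARTS HERE
--
--     '''
--     lst = [] # Create empty list
--     if n >= 1: # Check if positive
--         lst = [*range(1,n+1)] # Start adding iterations
--         lst += list(reversed(lst)) # Reverse initial list and add it to lst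
--     if n <= 1:
--         lst = [*range(n, 0)] # Start adding iterations
--         lst += list(reversed(lst)) # Reverse initial list and add it to lst
--     return lst
--
--     # New code, I wasn't sure if the method reversed or the * were allowed. So I'm not submitting this one
--     '''
--
--     count = 0 # Creates count
--     lst = []
--     i = 1 # Increment for positive number
--     j = 0 # Increment for negative number
--     max = abs(n) # Finds max by taking absolute value of n
--
--     if n > 0:
--         maxCount = abs(n) * 2 # If n is positive max count is double
--     elif n < 0:
--         maxCount = (abs(n) * 2) - 1 # If n is negativ max count is double - 1
--
--     while (count < maxCount): # Loop runs double the amount of the number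
--         if n > 0: # Checks if positive
--             count += 1
--             if count <= max:
--                 lst += [i] # Adds to list
--                 if count != n:
--                     i += 1 # Increment n
--             elif count >= max: # Checks if count is greater than max
--                 lst += [i] # Adds to list
--                 i -= 1
--         elif -max < 0: # Checks if negative
--             count += 1
--             if count <= max:
--                 lst += [n + j] # Adds to list
--                 if count != max: # Checks if count is not equal to max
--                     j += 1 # Increment j
--             if count >= max:
--                 lst += [n + j] # Adds to list
--                 j -= 1
--
--     return(lst)
-- ===== SOURCE B (Python) =====
-- def joined_list(n):
--     if n > 0:
--         ramp = list(range(1, n + 1))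
--     elif n < 0:
--         ramp = list(range(n, 0))
--     return ramp + ramp[::-1]
-- ===== Notes on version B (the rewrite author's own statement) =====
-- stated objective: simpler
-- what changed: Replaces A's counter-driven while loop (flags, two increment variables, per-element branching) with building the ascending ramp directly via range and mirroring it (ramp + ramp[::-1]); at n=0 both leave their variable unassigned and raise UnboundLocalError, excluded by Pre_.
import Mathlib
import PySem

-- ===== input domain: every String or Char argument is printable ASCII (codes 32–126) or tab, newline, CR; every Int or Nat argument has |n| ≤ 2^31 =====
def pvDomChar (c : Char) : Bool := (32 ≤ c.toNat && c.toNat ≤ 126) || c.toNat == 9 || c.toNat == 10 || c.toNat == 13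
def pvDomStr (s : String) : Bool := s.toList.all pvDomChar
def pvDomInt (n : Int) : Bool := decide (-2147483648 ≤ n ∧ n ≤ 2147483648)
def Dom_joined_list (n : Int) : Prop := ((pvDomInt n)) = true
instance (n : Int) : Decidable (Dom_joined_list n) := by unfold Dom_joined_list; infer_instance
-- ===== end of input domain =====

-- B replaces A's counter-driven while loop by building the ascending ramp with range and mirroring it (simpler decomposition).


-- ===== PORT A =====
-- The while loop of A, step for step: state (count, lst, i, j); maxv = abs(n).
-- The final 'else lst' is unreachable for n ≠ 0 (for n = 0 Python raises before the
-- loop; excluded by Pre_) and only makes the recursion total.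
def joined_listLoop (n maxv maxCount count : Int) (lst : List Int) (i j : Int) :
    List Int :=
  if _h : count < maxCount then
    if n > 0 then
      if count + 1 ≤ maxv then
        if count + 1 ≠ n then
          joined_listLoop n maxv maxCount (count + 1) (lst ++ [i]) (i + 1) j
        else
          joined_listLoop n maxv maxCount (count + 1) (lst ++ [i]) i j
      else if count + 1 ≥ maxv then
        joined_listLoop n maxv maxCount (count + 1) (lst ++ [i]) (i - 1) j
      else
        joined_listLoop n maxv maxCount (count + 1) lst i j
    else if -maxv < 0 then
      -- first if of the body: count <= max (append, maybe j += 1)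
      let p : List Int × Int :=
        if count + 1 ≤ maxv then
          if count + 1 ≠ maxv then (lst ++ [n + j], j + 1) else (lst ++ [n + j], j)
        else (lst, j)
      -- second if of the body: count >= max (append again, j -= 1)
      if count + 1 ≥ maxv then
        joined_listLoop n maxv maxCount (count + 1) (p.1 ++ [n + p.2]) i (p.2 - 1)
      else
        joined_listLoop n maxv maxCount (count + 1) p.1 i p.2
    else lst
  else lst
termination_by (maxCount - count).toNat
decreasing_by all_goals omega

def joined_list (n : Int) : List Int :=
  if n > 0 then joined_listLoop n |n| (|n| * 2) 0 [] 1 0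
  else if n < 0 then joined_listLoop n |n| (|n| * 2 - 1) 0 [] 1 0
  else []  -- n = 0: Python raises UnboundLocalError (maxCount unassigned); outside Pre_

-- ===== PORT B =====
-- ramp = list(range(1, n+1)) if n > 0 else list(range(n, 0)); return ramp + ramp[::-1].
-- At n = 0 the Python leaves ramp unassigned and raises; the port uses [] there (outside Pre_).
def joined_list_ramp (n : Int) : List Int :=
  if n > 0 then PySem.List.pyRange 1 (n + 1) 1
  else if n < 0 then PySem.List.pyRange n 0 1
  else []

def joined_list_alt (n : Int) : List Int :=
  joined_list_ramp n ++ (joined_list_ramp n).reverse  -- ramp[::-1] is List.reverse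

-- ===== PRECONDITION & SPEC =====
-- Pre_ excludes only n = 0, on which A raises UnboundLocalError (maxCount never assigned).
def Pre_joined_list (n : Int) : Prop := n ≠ 0
instance (n : Int) : Decidable (Pre_joined_list n) := by unfold Pre_joined_list; infer_instance
def pvWitness_joined_list : Int := (5)

def Spec_joined_list (n : Int) (out : List Int) : Prop := out = joined_list_alt n
instance (n : Int) (out : List Int) : Decidable (Spec_joined_list n out) := by unfold Spec_joined_list; infer_instance

-- ===== CLAIM (what is proved, stated in full; the proofs are below) =====
def Claim_equal_joined_list : Prop := ∀ (n : Int), Dom_joined_list n → Pre_joined_list n → Spec_joined_list n (joined_list n)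

-- ===== LEMMAS AND PROOFS =====

theorem map_range_succ_cons (d : Nat) (f : Nat → Int) :
    (List.range (d + 1)).map f = f 0 :: (List.range d).map (fun k => f (k + 1)) := by
  rw [List.range_succ_eq_map, List.map_cons, List.map_map]
  rfl

-- Descending phase, n > 0: from count ≥ n the loop appends i, i-1, …
theorem jl_desc_pos (n : Int) (hn : 0 < n) (d : Nat) :
    ∀ (count i j : Int) (lst : List Int), count = 2 * n - d → n ≤ count →
      joined_listLoop n n (n * 2) count lst i j
        = lst ++ (List.range d).map (fun k : Nat => i - (k : Int)) := by
  induction d with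
  | zero =>
      intro count i j lst hc _
      rw [joined_listLoop, dif_neg (by omega)]
      simp
  | succ d ih =>
      intro count i j lst hc hge
      have hd : (d : Int) ≥ 0 := by positivity
      rw [joined_listLoop]
      rw [dif_pos (by omega), if_pos hn, if_neg (by omega), if_pos (by omega)]
      rw [ih (count + 1) (i - 1) j (lst ++ [i]) (by omega) (by omega)]
      rw [map_range_succ_cons d (fun k : Nat => i - (k : Int))]
      have hf : (fun k : Nat => i - ((k + 1 : Nat) : Int))
          = (fun k : Nat => (i - 1) - (k : Int)) := by
        funext k; push_cast; ring
      rw [hf, List.append_assoc]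
      simp

-- Ascending phase, n > 0: while count < n the loop appends count+1, …, n, then the
-- descending phase appends n, n-1, …, 1.
theorem jl_asc_pos (n : Int) (hn : 0 < n) (a : Nat) :
    ∀ (count i j : Int) (lst : List Int), 1 ≤ a → count = n - a → 0 ≤ count →
      i = count + 1 →
      joined_listLoop n n (n * 2) count lst i j
        = lst ++ (List.range a).map (fun k : Nat => count + 1 + (k : Int))
              ++ (List.range n.toNat).map (fun k : Nat => n - (k : Int)) := by
  induction a with
  | zero => intro _ _ _ _ h; omega
  | succ a ih =>
      intro count i j lst _ hc h0 hi
      subst hi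
      rw [joined_listLoop]
      rw [dif_pos (by omega), if_pos hn, if_pos (by omega)]
      by_cases ha : a = 0
      · subst ha
        rw [if_neg (by omega)]
        rw [jl_desc_pos n hn n.toNat (count + 1) (count + 1) j (lst ++ [count + 1])
              (by omega) (by omega)]
        have hcn : count + 1 = n := by omega
        simp [hcn]
      · rw [if_pos (by omega)]
        rw [ih (count + 1) (count + 1 + 1) j (lst ++ [count + 1]) (by omega)
              (by push_cast at hc ⊢; omega) (by omega) rfl]
        rw [map_range_succ_cons a (fun k : Nat => count + 1 + (k : Int))]
        have hf : (fun k : Nat => count + 1 + ((k + 1 : Nat) : Int))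
            = (fun k : Nat => count + 1 + 1 + (k : Int)) := by
          funext k; push_cast; ring
        rw [hf]
        simp [List.append_assoc]

-- Descending phase, n < 0: from count ≥ -n the loop appends n+j, n+j-1, …
theorem jl_desc_neg (n : Int) (hn : n < 0) (d : Nat) :
    ∀ (count i j : Int) (lst : List Int), count = -n * 2 - 1 - d → -n ≤ count →
      joined_listLoop n (-n) (-n * 2 - 1) count lst i j
        = lst ++ (List.range d).map (fun k : Nat => n + j - (k : Int)) := by
  induction d with
  | zero =>
      intro count i j lst hc _
      rw [joined_listLoop, dif_neg (by omega)]
      simp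
  | succ d ih =>
      intro count i j lst hc hge
      have hc' : count = -n * 2 - 1 - ((d : Int) + 1) := by push_cast at hc; omega
      rw [joined_listLoop]
      rw [dif_pos (by omega), if_neg (by omega), if_pos (by omega)]
      have h1 : ¬ (count + 1 ≤ -n) := by omega
      have h2 : count + 1 ≥ -n := by omega
      simp only [h1, if_false, h2, if_true]
      rw [ih (count + 1) i (j - 1) (lst ++ [n + j]) (by omega) (by omega)]
      rw [map_range_succ_cons d (fun k : Nat => n + j - (k : Int))]
      have hf : (fun k : Nat => n + j - ((k + 1 : Nat) : Int))
          = (fun k : Nat => n + (j - 1) - (k : Int)) := by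
        funext k; push_cast; ring
      rw [hf, List.append_assoc]
      simp

-- Ascending phase, n < 0: while count < -n the loop appends n+count, …, -2, the
-- boundary step appends -1 twice, then the descending phase appends -2, …, n.
theorem jl_asc_neg (n : Int) (hn : n < 0) (a : Nat) :
    ∀ (count i j : Int) (lst : List Int), 1 ≤ a → count = -n - a → 0 ≤ count →
      count = j →
      joined_listLoop n (-n) (-n * 2 - 1) count lst i j
        = lst ++ (List.range a).map (fun k : Nat => n + count + (k : Int)) ++ [-1]
              ++ (List.range ((-n).toNat - 1)).map (fun k : Nat => -2 - (k : Int)) := by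
  induction a with
  | zero => intro _ _ _ _ h; omega
  | succ a ih =>
      intro count i j lst _ hc h0 hj
      subst hj  -- eliminates j
      have hc' : count = -n - ((a : Int) + 1) := by push_cast at hc; omega
      rw [joined_listLoop]
      rw [dif_pos (by omega), if_neg (by omega), if_pos (by omega)]
      by_cases ha : a = 0
      · -- boundary step: count + 1 = -n, both ifs of the body fire
        subst ha
        have h1 : count + 1 ≤ -n := by omega
        have h2 : ¬ (count + 1 ≠ -n) := by omega
        have h3 : count + 1 ≥ -n := by omega
        simp only [if_pos h1, if_neg h2, if_pos h3, ge_iff_le]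
        rw [jl_desc_neg n hn ((-n).toNat - 1) (count + 1) i (count - 1)
              ((lst ++ [n + count]) ++ [n + count]) (by omega) (by omega)]
        have hcn : n + count = -1 := by omega
        have hf : (fun k : Nat => n + (count - 1) - (k : Int))
            = (fun k : Nat => -2 - (k : Int)) := by
          funext k; omega
        rw [hf, hcn]
        simp
      · have h1 : count + 1 ≤ -n := by omega
        have h2 : count + 1 ≠ -n := by omega
        have h3 : ¬ (count + 1 ≥ -n) := by omega
        simp only [if_pos h1, if_pos h2, if_neg h3]
        rw [ih (count + 1) i (count + 1) (lst ++ [n + count]) (by omega)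
              (by omega) (by omega) rfl]
        rw [map_range_succ_cons a (fun k : Nat => n + count + (k : Int))]
        have hf : (fun k : Nat => n + count + ((k + 1 : Nat) : Int))
            = (fun k : Nat => n + (count + 1) + (k : Int)) := by
          funext k; push_cast; ring
        rw [hf]
        simp [List.append_assoc]

-- The two sides written as maps over List.range, per sign.
theorem jlA_pos (n : Int) (hn : 0 < n) :
    joined_list n
      = (List.range n.toNat).map (fun k : Nat => 1 + (k : Int))
          ++ (List.range n.toNat).map (fun k : Nat => n - (k : Int)) := by
  unfold joined_list
  rw [if_pos hn, abs_of_pos hn]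
  rw [jl_asc_pos n hn n.toNat 0 1 0 [] (by omega) (by omega) le_rfl (by ring)]
  simp

theorem jlA_neg (n : Int) (hn : n < 0) :
    joined_list n
      = (List.range (-n).toNat).map (fun k : Nat => n + (k : Int))
          ++ ((-1) :: (List.range ((-n).toNat - 1)).map (fun k : Nat => -2 - (k : Int))) := by
  unfold joined_list
  rw [if_neg (by omega), if_pos hn, abs_of_neg hn]
  rw [jl_asc_neg n hn (-n).toNat 0 1 0 [] (by omega) (by omega) le_rfl rfl]
  have hf : (fun k : Nat => n + 0 + (k : Int)) = (fun k : Nat => n + (k : Int)) := by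
    funext k; ring
  rw [hf]
  simp

-- ===== VERDICT (by name: the statement is the Claim_ definition above) =====
theorem joined_list_spec : Claim_equal_joined_list := by
  intro n _ hpre
  unfold Spec_joined_list joined_list_alt joined_list_ramp
  rcases lt_trichotomy n 0 with hn | hn | hn
  · rw [if_neg (by omega), if_pos hn, jlA_neg n hn]
    have h := PySem.List.pyRange_neg_one_eq_reverse (-1) (n - 1)
    rw [show n - 1 + 1 = n by ring, show (-1 : Int) + 1 = 0 by ring] at h
    rw [← h, PySem.List.pyRange_neg_one, PySem.List.pyRange_one]
    rw [show (0 - n).toNat = (-n).toNat by omega,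
        show (-1 - (n - 1)).toNat = (-n).toNat by omega]
    congr 1
    obtain ⟨m, hm⟩ : ∃ m, (-n).toNat = m + 1 := ⟨(-n).toNat - 1, by omega⟩
    rw [hm, map_range_succ_cons m (fun k : Nat => -1 - (k : Int))]
    simp only [Nat.add_sub_cancel]
    congr 1
    apply List.map_congr_left
    intro a _
    push_cast
    ring
  · exact absurd hn hpre
  · rw [if_pos hn, jlA_pos n hn]
    have h := PySem.List.pyRange_neg_one_eq_reverse n 0
    rw [show (0 : Int) + 1 = 1 by ring] at h
    rw [← h, PySem.List.pyRange_neg_one, PySem.List.pyRange_one]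
    rw [show (n - 0).toNat = n.toNat by omega, show (n + 1 - 1).toNat = n.toNat by omega]
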